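-- pv_equiv track=rewrite | github.com/mickeykkim/inky_pi | inky_pi/main.py | _abbreviate_station_name
-- ===== SOURCE A (Python) =====
-- from typing import Any, Callable, Dict, Union
--
-- def _abbreviate_station_name(station_name: str) -> str:
--     """Abbreviate station name by shortening words like street, lane, etc.
--
--     Args:
--         station_name (str): Station name
--
--     Returns:
--         str: Abbreviated station name
--     """
--     abbreviation_dict: Dict[str, str] = {
--         "Street": "St",
--         "Lane": "Ln",
--         "Court": "Ct",
--         "Road": "Rd",
--         "North": "N",
--         "South": "S",
--         "East": "E",
--         "West": "W",
--         "Thameslink": "TL",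
--     }
--     for key, value in abbreviation_dict.items():
--         station_name = station_name.replace(key, value)
--
--     return station_name
-- ===== SOURCE B (Python) =====
-- def _abbreviate_station_name(station_name: str) -> str:
--     """Abbreviate station name in a single left-to-right scan.
--
--     At each position the first matching abbreviation key is replaced by its
--     value and the scan resumes after it; otherwise the character is copied.
--     """
--     table = [
--         ("Street", "St"),
--         ("Lane", "Ln"),
--         ("Court", "Ct"),
--         ("Road", "Rd"),
--         ("North", "N"),
--         ("South", "S"),
--         ("East", "E"),
--         ("West", "W"),
--         ("Thameslink", "TL"),
--     ]
--     out = []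
--     i = 0
--     n = len(station_name)
--     while i < n:
--         for key, value in table:
--             if station_name.startswith(key, i):
--                 out.append(value)
--                 i += len(key)
--                 break
--         else:
--             out.append(station_name[i])
--             i += 1
--     return "".join(out)
-- ===== Notes on version B (the rewrite author's own statement) =====
-- stated objective: alternative
-- what changed: Replaces nine sequential full-string .replace passes by a single left-to-right scan that at each position substitutes the first matching table key and otherwise copies the character.
import Mathlib
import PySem

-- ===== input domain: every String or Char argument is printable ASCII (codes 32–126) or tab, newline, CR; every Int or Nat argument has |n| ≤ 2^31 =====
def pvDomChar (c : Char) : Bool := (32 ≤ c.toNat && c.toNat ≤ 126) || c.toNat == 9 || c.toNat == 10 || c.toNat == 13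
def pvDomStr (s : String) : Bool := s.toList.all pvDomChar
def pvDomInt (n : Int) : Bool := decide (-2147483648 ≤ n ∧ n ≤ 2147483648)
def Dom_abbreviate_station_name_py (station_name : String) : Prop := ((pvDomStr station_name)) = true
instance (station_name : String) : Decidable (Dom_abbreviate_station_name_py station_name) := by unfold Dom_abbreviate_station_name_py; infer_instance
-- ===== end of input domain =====

-- B replaces A's nine sequential full-string .replace passes by one left-to-right scan
-- substituting the first matching table key at each position (objective: alternative).

-- ===== PORT A =====
def abbreviate_station_name_py (station_name : String) : String :=
  let abbreviation_dict : PySem.Dict String String :=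
    PySem.Dict.ofList [("Street", "St"), ("Lane", "Ln"), ("Court", "Ct"), ("Road", "Rd"),
      ("North", "N"), ("South", "S"), ("East", "E"), ("West", "W"), ("Thameslink", "TL")]
  abbreviation_dict.items.foldl (fun s kv => PySem.Str.replace s kv.1 kv.2) station_name

-- ===== PORT B =====
-- Source B's abbreviation table, as lists of characters
def pvTable : List (List Char × List Char) :=
  [("Street".toList, "St".toList), ("Lane".toList, "Ln".toList), ("Court".toList, "Ct".toList),
   ("Road".toList, "Rd".toList), ("North".toList, "N".toList), ("South".toList, "S".toList),
   ("East".toList, "E".toList), ("West".toList, "W".toList), ("Thameslink".toList, "TL".toList)]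

-- Source B's while loop: at each position emit the value of the first matching key (the
-- for-else over the table is `find?`) and resume after it, else copy the character.
def pvScan (table : List (List Char × List Char)) : List Char → List Char
  | [] => []
  | c :: cs =>
    match table.find? (fun kv => kv.1.isPrefixOf (c :: cs)) with
    | some (k, v) => v ++ pvScan table (cs.drop (k.length - 1))
    | none => c :: pvScan table cs
termination_by l => l.length
decreasing_by all_goals simp

def abbreviate_station_name_py_alt (station_name : String) : String :=
  String.ofList (pvScan pvTable station_name.toList)

-- ===== PRECONDITION & SPEC =====
def Spec_abbreviate_station_name_py (station_name : String) (out : String) : Prop := out = abbreviate_station_name_py_alt station_name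
instance (station_name : String) (out : String) : Decidable (Spec_abbreviate_station_name_py station_name out) := by unfold Spec_abbreviate_station_name_py; infer_instance

-- ===== CLAIM (what is proved, stated in full; the proofs are below) =====
def Claim_equal_abbreviate_station_name_py : Prop := ∀ (station_name : String), Dom_abbreviate_station_name_py station_name → Spec_abbreviate_station_name_py station_name (abbreviate_station_name_py station_name)

-- ===== LEMMAS AND PROOFS =====

-- A clean restatement of PySem.Chars.replace for a nonempty pattern (o :: ot).
def pvRep (o : Char) (ot v : List Char) : List Char → List Char
  | [] => []
  | c :: t =>
    if (o :: ot).isPrefixOf (c :: t) then v ++ pvRep o ot v (t.drop ot.length)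
    else c :: pvRep o ot v t
termination_by l => l.length
decreasing_by all_goals simp

lemma pvGo_eq (o : Char) (ot v : List Char) :
    ∀ (fuel : Nat) (l acc : List Char), l.length ≤ fuel →
      PySem.Chars.replace.go (o :: ot) v fuel l acc = acc.reverse ++ pvRep o ot v l := by
  intro fuel
  induction fuel with
  | zero =>
    intro l acc hl
    have : l = [] := by cases l <;> simp_all
    subst this
    simp [PySem.Chars.replace.go, pvRep]
  | succ n ih =>
    intro l acc hl
    cases l with
    | nil => simp [PySem.Chars.replace.go, pvRep]
    | cons c t =>
      rw [PySem.Chars.replace.go]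
      by_cases h : (o :: ot).isPrefixOf (c :: t) = true
      · rw [if_pos h]
        have hdrop : (List.drop (o :: ot).length (c :: t)).length ≤ n := by
          simp [List.length_drop] at *; omega
        rw [ih _ _ hdrop]
        rw [pvRep, if_pos h]
        simp
      · rw [if_neg h]
        have ht : t.length ≤ n := by simp at hl; omega
        rw [ih _ _ ht]
        rw [pvRep, if_neg h]
        simp

lemma pvReplace_eq (o : Char) (ot v s : List Char) :
    PySem.Chars.replace s (o :: ot) v = pvRep o ot v s := by
  rw [PySem.Chars.replace]
  simp only [List.isEmpty_cons, if_false, Bool.false_eq_true]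
  rw [pvGo_eq o ot v s.length s [] (le_refl _)]
  simp

lemma pvRep_nil (o : Char) (ot v : List Char) : pvRep o ot v [] = [] := by
  rw [pvRep]

lemma pvRep_cons_neg (o : Char) (ot v : List Char) (c : Char) (cs : List Char)
    (h : ¬ (o :: ot).isPrefixOf (c :: cs) = true) :
    pvRep o ot v (c :: cs) = c :: pvRep o ot v cs := by
  rw [pvRep, if_neg h]

lemma pvRep_append_pos (o : Char) (ot v X : List Char) :
    pvRep o ot v ((o :: ot) ++ X) = v ++ pvRep o ot v X := by
  have hpre : (o :: ot).isPrefixOf (o :: (ot ++ X)) = true := by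
    rw [List.isPrefixOf_iff_prefix, List.cons_prefix_cons]
    exact ⟨rfl, ⟨X, rfl⟩⟩
  rw [List.cons_append, pvRep, if_pos hpre, List.drop_left]

-- If k and p disagree within their common length, k is a prefix of no extension of p.
lemma pvNotPrefix_of_take_ne (k p : List Char) (h : k.take p.length ≠ p.take k.length) (X : List Char) :
    ¬ k <+: p ++ X := by
  intro hp
  apply h
  have hk := List.prefix_iff_eq_take.mp hp
  have h1 : k.take p.length = (p ++ X).take (min p.length k.length) := by
    conv_lhs => rw [hk]
    rw [List.take_take]
  have h2 : (p ++ X).take (min p.length k.length) = p.take (min p.length k.length) := by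
    rw [List.take_append]
    have hz : min p.length k.length - p.length = 0 := by omega
    rw [hz]
    simp
  have h3 : p.take (min p.length k.length) = p.take k.length := by
    rcases Nat.le_total k.length p.length with hle | hle
    · rw [min_eq_right hle]
    · rw [min_eq_left hle, List.take_length, List.take_of_length_le hle]
  rw [h1, h2, h3]

-- decidable mismatch / commuting conditions on the literal table
def pvTM (k p : List Char) : Bool := decide (k.take p.length ≠ p.take k.length)

def pvCommOK (k p : List Char) : Bool := (List.range p.length).all (fun m => pvTM k (p.drop m))

-- a replace pass whose pattern mismatches every suffix of p commutes past p
lemma pvRep_commute (o : Char) (ot v : List Char) (p : List Char)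
    (h : pvCommOK (o :: ot) p = true) (X : List Char) :
    pvRep o ot v (p ++ X) = p ++ pvRep o ot v X := by
  induction p with
  | nil => simp
  | cons a p' ih =>
    rw [pvCommOK, List.all_eq_true] at h
    have h0 := h 0 (by simp)
    simp only [List.drop_zero] at h0
    rw [pvTM, decide_eq_true_iff] at h0
    have hnp : ¬ (o :: ot) <+: (a :: p') ++ X := pvNotPrefix_of_take_ne _ _ h0 X
    have hnp' : ¬ (o :: ot).isPrefixOf (a :: (p' ++ X)) = true := by
      rw [List.isPrefixOf_iff_prefix]
      rw [List.cons_append] at hnp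
      exact hnp
    have h' : pvCommOK (o :: ot) p' = true := by
      rw [pvCommOK, List.all_eq_true]
      intro m hm
      have hmem : m + 1 ∈ List.range (a :: p').length := by
        simp only [List.mem_range, List.length_cons] at hm ⊢
        omega
      have := h (m + 1) hmem
      simpa only [List.drop_succ_cons] using this
    rw [List.cons_append, pvRep_cons_neg _ _ _ _ _ hnp', ih h', List.cons_append]

-- a lowercase string that prefixes the output of a replace pass (whose value starts
-- with an uppercase letter) already prefixed its input
lemma pvLowerPres (o : Char) (ot : List Char) (v0 : Char) (vt : List Char)
    (hv : v0.isUpper = true) :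
    ∀ (X t : List Char), (∀ ch ∈ t, ch.isUpper = false) → t <+: pvRep o ot (v0 :: vt) X → t <+: X := by
  intro X
  induction X with
  | nil => intro t _ h; rwa [pvRep_nil] at h
  | cons c cs ih =>
    intro t hlow hpre
    cases t with
    | nil => exact List.nil_prefix
    | cons t0 tt =>
      by_cases hb : (o :: ot).isPrefixOf (c :: cs) = true
      · rw [pvRep, if_pos hb] at hpre
        rw [List.cons_append, List.cons_prefix_cons] at hpre
        have := hlow t0 (by simp)
        rw [hpre.1] at this
        rw [this] at hv
        exact absurd hv (by simp)
      · rw [pvRep_cons_neg _ _ _ _ _ hb] at hpre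
        rw [List.cons_prefix_cons] at hpre ⊢
        exact ⟨hpre.1, ih tt (fun ch hch => hlow ch (by simp [hch])) hpre.2⟩

-- table-shape condition: nonempty key with lowercase tail, nonempty value with uppercase head
def pvGood (kv : List Char × List Char) : Bool :=
  !kv.1.isEmpty && kv.1.tail.all (fun ch => !ch.isUpper) && !kv.2.isEmpty && (kv.2.headD 'A').isUpper

-- every pass of the chain after a given one commutes past that pass's value
def pvHV : List (List Char × List Char) → Bool
  | [] => true
  | kv :: rest => rest.all (fun kv' => pvCommOK kv'.1 kv.2) && pvHV rest

-- every pass commutes past every OTHER pass's key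
def pvHC (ps : List (List Char × List Char)) : Bool :=
  ps.all (fun kv => ps.all (fun kv' => kv' == kv || pvCommOK kv'.1 kv.1))

-- A's sequence of replace passes
def pvChain (ps : List (List Char × List Char)) (s : List Char) : List Char :=
  ps.foldl (fun s kv => PySem.Chars.replace s kv.1 kv.2) s

lemma pvChain_append (l₁ l₂ : List (List Char × List Char)) (s : List Char) :
    pvChain (l₁ ++ l₂) s = pvChain l₂ (pvChain l₁ s) := by
  simp [pvChain, List.foldl_append]

lemma pvChain_nil (ps : List (List Char × List Char)) (h : ∀ kv ∈ ps, kv.1 ≠ []) :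
    pvChain ps [] = [] := by
  induction ps with
  | nil => rfl
  | cons kv rest ih =>
    obtain ⟨o, ot, hk⟩ : ∃ o ot, kv.1 = o :: ot := by
      cases hkv : kv.1 with
      | nil => exact absurd hkv (h kv (by simp))
      | cons a b => exact ⟨a, b, rfl⟩
    show pvChain rest (PySem.Chars.replace [] kv.1 kv.2) = []
    rw [hk, pvReplace_eq, pvRep_nil]
    exact ih (fun kv' h' => h kv' (by simp [h']))

lemma pvChain_commute (ps : List (List Char × List Char)) (p : List Char)
    (h : ∀ kv ∈ ps, kv.1 ≠ [] ∧ pvCommOK kv.1 p = true) (X : List Char) :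
    pvChain ps (p ++ X) = p ++ pvChain ps X := by
  induction ps generalizing X with
  | nil => rfl
  | cons kv rest ih =>
    obtain ⟨hne, hcomm⟩ := h kv (by simp)
    obtain ⟨o, ot, hk⟩ : ∃ o ot, kv.1 = o :: ot := by
      cases hkv : kv.1 with
      | nil => exact absurd hkv hne
      | cons a b => exact ⟨a, b, rfl⟩
    show pvChain rest (PySem.Chars.replace (p ++ X) kv.1 kv.2) = p ++ pvChain rest (PySem.Chars.replace X kv.1 kv.2)
    rw [hk, pvReplace_eq, pvReplace_eq]
    rw [pvRep_commute o ot kv.2 p (hk ▸ hcomm) X]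
    exact ih (fun kv' h' => h kv' (by simp [h'])) _

-- when no key of ps matches at the head of c :: cs, the whole chain keeps c in place,
-- where X is any intermediate string whose lowercase prefixes come from cs
lemma pvChain_head (ps : List (List Char × List Char)) (c : Char) (cs : List Char)
    (hgood : ∀ kv ∈ ps, pvGood kv = true)
    (hnone : ∀ kv ∈ ps, kv.1.isPrefixOf (c :: cs) = false) :
    ∀ X : List Char, (∀ t : List Char, (∀ ch ∈ t, ch.isUpper = false) → t <+: X → t <+: cs) →
      pvChain ps (c :: X) = c :: pvChain ps X := by
  induction ps with
  | nil => intro X _; rfl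
  | cons kv rest ih =>
    intro X htrans
    have hg := hgood kv (by simp)
    obtain ⟨o, ot, hk⟩ : ∃ o ot, kv.1 = o :: ot := by
      cases hkv : kv.1 with
      | nil => exact absurd hg (by simp [pvGood, hkv])
      | cons a b => exact ⟨a, b, rfl⟩
    obtain ⟨v0, vt, hv⟩ : ∃ v0 vt, kv.2 = v0 :: vt := by
      cases hkv : kv.2 with
      | nil => exact absurd hg (by simp [pvGood, hkv])
      | cons a b => exact ⟨a, b, rfl⟩
    have hotlow : ∀ ch ∈ ot, ch.isUpper = false := by
      have := hg
      simp only [pvGood, Bool.and_eq_true, List.all_eq_true] at this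
      intro ch hch
      have h2 := this.1.1.2 ch (by rw [hk]; simpa using hch)
      simpa using h2
    have hv0 : v0.isUpper = true := by
      have := hg
      simp only [pvGood, Bool.and_eq_true] at this
      have h2 := this.2
      rw [hv] at h2
      simpa using h2
    -- the key does not match at the head of c :: X either
    have hnp : ¬ (o :: ot).isPrefixOf (c :: X) = true := by
      intro habs
      rw [List.isPrefixOf_iff_prefix, List.cons_prefix_cons] at habs
      have h0 := hnone kv (by simp)
      rw [hk] at h0
      have : (o :: ot).isPrefixOf (c :: cs) = true := by
        rw [List.isPrefixOf_iff_prefix, List.cons_prefix_cons]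
        exact ⟨habs.1, htrans ot hotlow habs.2⟩
      rw [h0] at this
      exact absurd this (by simp)
    show pvChain rest (PySem.Chars.replace (c :: X) kv.1 kv.2) = c :: pvChain rest (PySem.Chars.replace X kv.1 kv.2)
    rw [hk, hv, pvReplace_eq, pvReplace_eq, pvRep_cons_neg _ _ _ _ _ hnp]
    exact ih (fun kv' h' => hgood kv' (by simp [h'])) (fun kv' h' => hnone kv' (by simp [h']))
      (pvRep o ot (v0 :: vt) X)
      (fun t hlow hpre => htrans t hlow (pvLowerPres o ot v0 vt hv0 X t hlow hpre))

lemma pvHV_split (ps pre post : List (List Char × List Char)) (kv : List Char × List Char)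
    (h : pvHV ps = true) (hsplit : ps = pre ++ kv :: post) :
    ∀ kv' ∈ post, pvCommOK kv'.1 kv.2 = true := by
  induction pre generalizing ps with
  | nil =>
    subst hsplit
    simp only [List.nil_append, pvHV, Bool.and_eq_true, List.all_eq_true] at h
    exact h.1
  | cons a pre' ih =>
    subst hsplit
    simp only [List.cons_append, pvHV, Bool.and_eq_true] at h
    exact ih _ h.2 rfl

-- the generic theorem: the chain of replace passes equals the single scan
theorem pvChain_eq_scan (ps : List (List Char × List Char))
    (hgood : ∀ kv ∈ ps, pvGood kv = true)
    (hc : pvHC ps = true) (hv : pvHV ps = true) :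
    ∀ s, pvChain ps s = pvScan ps s := by
  have hne : ∀ kv ∈ ps, kv.1 ≠ [] := by
    intro kv hkv habs
    exact absurd (hgood kv hkv) (by simp [pvGood, habs])
  suffices H : ∀ n (s : List Char), s.length ≤ n → pvChain ps s = pvScan ps s by
    intro s; exact H s.length s (le_refl _)
  intro n
  induction n with
  | zero =>
    intro s hs
    have : s = [] := by cases s <;> simp_all
    subst this
    rw [pvChain_nil ps hne, pvScan]
  | succ n ih =>
    intro s hs
    cases s with
    | nil => rw [pvChain_nil ps hne, pvScan]
    | cons c cs =>
      rw [pvScan]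
      cases hfind : ps.find? (fun kv => kv.1.isPrefixOf (c :: cs)) with
      | none =>
        have hnone : ∀ kv ∈ ps, kv.1.isPrefixOf (c :: cs) = false := by
          intro kv hkv
          have hx := List.find?_eq_none.mp hfind kv hkv
          exact Bool.eq_false_iff.mpr hx
        rw [pvChain_head ps c cs hgood hnone cs (fun t _ h => h)]
        rw [ih cs (by simp at hs; omega)]
      | some kv =>
        obtain ⟨k, v⟩ := kv
        obtain ⟨hpred, pre, post, hsplit, hprefalse⟩ := List.find?_eq_some_iff_append.mp hfind
        have hmem : (k, v) ∈ ps := List.mem_of_find?_eq_some hfind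
        obtain ⟨o, ot, hk⟩ : ∃ o ot, k = o :: ot := by
          cases hkk : k with
          | nil => exact absurd hkk (hne (k, v) hmem)
          | cons a b => exact ⟨a, b, rfl⟩
        -- s = k ++ r
        have hkpre : k <+: (c :: cs) := by rwa [← List.isPrefixOf_iff_prefix]
        obtain ⟨r, hr⟩ := hkpre
        -- the scan's remainder equals r
        have hrem : cs.drop (k.length - 1) = r := by
          rw [hk] at hr ⊢
          simp only [List.length_cons, Nat.add_sub_cancel]
          rw [List.cons_append, List.cons.injEq] at hr
          rw [← hr.2, List.drop_left]
        -- passes before (k, v) commute past k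
        have hprecomm : ∀ kv' ∈ pre, kv'.1 ≠ [] ∧ pvCommOK kv'.1 k = true := by
          intro kv' hkv'
          have hmem' : kv' ∈ ps := by rw [hsplit]; simp [hkv']
          refine ⟨hne kv' hmem', ?_⟩
          have hneq : kv' ≠ (k, v) := by
            intro habs
            have := hprefalse kv' hkv'
            rw [habs] at this
            simp [hpred] at this
          have := (List.all_eq_true.mp hc) (k, v) hmem
          have h2 := (List.all_eq_true.mp this) kv' hmem'
          rcases Bool.or_eq_true_iff.mp h2 with h3 | h3
          · exact absurd (by exact_mod_cast eq_of_beq h3) hneq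
          · exact h3
        -- passes after (k, v) commute past v
        have hpostcomm : ∀ kv' ∈ post, kv'.1 ≠ [] ∧ pvCommOK kv'.1 v = true := by
          intro kv' hkv'
          have hmem' : kv' ∈ ps := by rw [hsplit]; simp [hkv']
          exact ⟨hne kv' hmem', pvHV_split ps pre post (k, v) hv hsplit kv' hkv'⟩
        calc pvChain ps (c :: cs)
            = pvChain ((k, v) :: post) (pvChain pre (k ++ r)) := by
              rw [hsplit, pvChain_append, hr]
          _ = pvChain ((k, v) :: post) (k ++ pvChain pre r) := by
              rw [pvChain_commute pre k hprecomm r]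
          _ = pvChain post (v ++ PySem.Chars.replace (pvChain pre r) k v) := by
              show pvChain post (PySem.Chars.replace (k ++ pvChain pre r) k v) = _
              rw [hk, pvReplace_eq, pvReplace_eq, pvRep_append_pos]
          _ = v ++ pvChain post (PySem.Chars.replace (pvChain pre r) k v) := by
              rw [pvChain_commute post v hpostcomm]
          _ = v ++ pvChain ps r := by rw [hsplit, pvChain_append]; rfl
          _ = v ++ pvScan ps r := by
              rw [ih r ?_]
              have : (c :: cs).length = k.length + r.length := by rw [← hr]; simp
              simp only [List.length_cons] at this hs
              rw [hk] at this
              simp only [List.length_cons] at this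
              omega
          _ = v ++ pvScan ps (cs.drop (k.length - 1)) := by rw [hrem]

-- evaluating port A's dict items and fold to the char-level chain over pvTable
lemma pvA_toList (s : String) :
    (abbreviate_station_name_py s).toList = pvChain pvTable s.toList := by
  show (PySem.Str.replace (PySem.Str.replace (PySem.Str.replace (PySem.Str.replace
    (PySem.Str.replace (PySem.Str.replace (PySem.Str.replace (PySem.Str.replace
    (PySem.Str.replace s "Street" "St") "Lane" "Ln") "Court" "Ct") "Road" "Rd")
    "North" "N") "South" "S") "East" "E") "West" "W") "Thameslink" "TL").toList
    = pvChain pvTable s.toList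
  simp only [PySem.Str.toList_replace, pvChain, pvTable, List.foldl]

-- ===== VERDICT (by name: the statement is the Claim_ definition above) =====
set_option maxHeartbeats 1000000 in
theorem abbreviate_station_name_py_spec : Claim_equal_abbreviate_station_name_py := by
  intro s _
  show abbreviate_station_name_py s = abbreviate_station_name_py_alt s
  rw [abbreviate_station_name_py_alt]
  conv_lhs => rw [← (String.ofList_toList (s := abbreviate_station_name_py s))]
  exact congrArg String.ofList ((pvA_toList s).trans
    (pvChain_eq_scan pvTable (by decide) (by decide) (by decide) s.toList))
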